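-- pv_equiv track=rewrite | github.com/truckirwin/devguard | AI_PROJECTS/NotesGen/backend/app/services/ai_notes_service.py | _convert_instructor_notes_to_rich_text
-- ===== SOURCE A (Python) =====
-- def _convert_instructor_notes_to_rich_text(text: str) -> str:
--     """Convert instructor notes to HTML with bullet + "|" format visible in content."""
--     if not text:
--         return ''
--
--     lines = text.split('\n')
--     html_lines = []
--     in_list = False
--
--     for line in lines:
--         line = line.strip()
--         if not line:
--             if in_list:
--                 html_lines.append('</ul>')
--                 in_list = False
--             html_lines.append('<p></p>')
--             continue
--
--         # Check if this looks like a bullet point (line starting with "- |")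
--         if line.startswith('- |'):
--             if not in_list:
--                 html_lines.append('<ul>')
--                 in_list = True
--
--             # Get content after the "- |" and include the "|" in the visible content
--             content = line[3:].strip()  # Remove the "- |" prefix
--
--             # Create list item with "|" visible in the content - the bullet will be automatic
--             html_lines.append(f'<li>|{content}</li>')
--         # Also handle legacy "|" format for backwards compatibility
--         elif line.startswith('|') and not line.startswith('|INSTRUCTOR') and not line.startswith('|STUDENT'):
--             if not in_list:
--                 html_lines.append('<ul>')
--                 in_list = True
--
--             # Get content after the "|" and include the "|" in the visible content
--             content = line[1:].strip()  # Remove the "|" prefix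
--
--             # Create list item with "|" visible in the content - the bullet will be automatic
--             html_lines.append(f'<li>|{content}</li>')
--         else:
--             if in_list:
--                 html_lines.append('</ul>')
--                 in_list = False
--             # Convert *italics* to HTML
--             line = line.replace('*', '<em>').replace('<em>', '<em>', 1).replace('<em>', '</em>')
--             html_lines.append(f'<p>{line}</p>')
--
--     # Close any open list
--     if in_list:
--         html_lines.append('</ul>')
--
--     return '\n'.join(html_lines)
-- ===== SOURCE B (Python) =====
-- from itertools import groupby
--
--
-- def _convert_instructor_notes_to_rich_text(text: str) -> str:
--     """Run-grouping reimplementation: classify each line, then emit whole bullet runs."""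
--     if not text:
--         return ''
--
--     def classify(raw):
--         line = raw.strip()
--         if not line:
--             return ('empty', '')
--         if line.startswith('- |'):
--             return ('bullet', line[3:].strip())
--         if line.startswith('|') and not line.startswith('|INSTRUCTOR') and not line.startswith('|STUDENT'):
--             return ('bullet', line[1:].strip())
--         return ('para', line.replace('*', '<em>').replace('<em>', '</em>'))
--
--     out = []
--     records = [classify(raw) for raw in text.split('\n')]
--     for is_bullet, group in groupby(records, key=lambda r: r[0] == 'bullet'):
--         if is_bullet:
--             out.append('<ul>')
--             out.extend('<li>|' + content + '</li>' for _, content in group)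
--             out.append('</ul>')
--         else:
--             for kind, content in group:
--                 out.append('<p></p>' if kind == 'empty' else '<p>' + content + '</p>')
--     return '\n'.join(out)
-- ===== Notes on version B (the rewrite author's own statement) =====
-- stated objective: alternative
-- what changed: B first maps every line to a classified record (empty/bullet/para with its content), then emits output by grouping maximal runs of bullet records with itertools.groupby, replacing A's single pass with a running in_list flag and the <ul>/</ul> open-close bookkeeping spread over every branch.
import Mathlib
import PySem

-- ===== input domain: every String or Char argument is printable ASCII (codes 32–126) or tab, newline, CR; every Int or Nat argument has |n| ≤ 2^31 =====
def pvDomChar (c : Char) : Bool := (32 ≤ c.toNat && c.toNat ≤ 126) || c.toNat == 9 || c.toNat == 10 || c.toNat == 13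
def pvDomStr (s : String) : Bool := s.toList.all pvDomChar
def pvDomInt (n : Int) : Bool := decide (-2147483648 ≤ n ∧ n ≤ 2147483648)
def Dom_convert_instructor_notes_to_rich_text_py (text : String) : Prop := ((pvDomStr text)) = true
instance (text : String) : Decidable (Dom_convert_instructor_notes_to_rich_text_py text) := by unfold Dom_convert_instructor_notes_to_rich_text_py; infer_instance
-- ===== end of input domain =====

-- B replaces A's running in_list flag by a classify-then-group-runs decomposition (objective: alternative,
-- same cost); A's per-line italics text transform (every '*' and every literal '<em>' becomes '</em>') is
-- reproduced exactly.

-- ===== PORT A =====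
-- hand port of str.replace(old, new, 1) (first occurrence only), exact for nonempty old (the only use here):
-- Python finds the first occurrence and splices `new` over it; PySem has no count-limited replace.
def pvReplaceOnce (s old new : List Char) : List Char :=
  let i := PySem.Chars.find s old
  if i < 0 then s else s.take i.toNat ++ new ++ s.drop (i.toNat + old.length)

-- line.replace('*','<em>').replace('<em>','<em>',1).replace('<em>','</em>')
def pvParaA (line : List Char) : List Char :=
  PySem.Chars.replace
    (pvReplaceOnce (PySem.Chars.replace line ['*'] "<em>".toList) "<em>".toList "<em>".toList)
    "<em>".toList "</em>".toList

-- the body of A's for-loop: state = (html_lines, in_list)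
def pvAStep (st : List (List Char) × Bool) (raw : List Char) : List (List Char) × Bool :=
  let line := PySem.Chars.strip raw
  if line = [] then
    ((if st.2 then st.1 ++ ["</ul>".toList] else st.1) ++ ["<p></p>".toList], false)
  else if PySem.Chars.startswith line "- |".toList then
    ((if st.2 then st.1 else st.1 ++ ["<ul>".toList]) ++
      ["<li>|".toList ++ PySem.Chars.strip (PySem.Chars.slice line (some 3) none) ++ "</li>".toList], true)
  else if PySem.Chars.startswith line "|".toList
       && !(PySem.Chars.startswith line "|INSTRUCTOR".toList)
       && !(PySem.Chars.startswith line "|STUDENT".toList) then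
    ((if st.2 then st.1 else st.1 ++ ["<ul>".toList]) ++
      ["<li>|".toList ++ PySem.Chars.strip (PySem.Chars.slice line (some 1) none) ++ "</li>".toList], true)
  else
    ((if st.2 then st.1 ++ ["</ul>".toList] else st.1) ++ ["<p>".toList ++ pvParaA line ++ "</p>".toList], false)

def convert_instructor_notes_to_rich_text_py (text : String) : String :=
  if text = "" then "" else
  let lines := PySem.Chars.splitOn text.toList ['\n']
  let st := lines.foldl pvAStep ([], false)
  let html := if st.2 then st.1 ++ ["</ul>".toList] else st.1
  String.ofList (PySem.Chars.join ['\n'] html)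

-- ===== PORT B =====
inductive PvRec where
  | bullet : List Char → PvRec
  | para : List Char → PvRec
  | emptyLine : PvRec
deriving DecidableEq, Repr

def pvClassify (raw : List Char) : PvRec :=
  let line := PySem.Chars.strip raw
  if line = [] then .emptyLine
  else if PySem.Chars.startswith line "- |".toList then
    .bullet (PySem.Chars.strip (PySem.Chars.slice line (some 3) none))
  else if PySem.Chars.startswith line "|".toList
       && !(PySem.Chars.startswith line "|INSTRUCTOR".toList)
       && !(PySem.Chars.startswith line "|STUDENT".toList) then
    .bullet (PySem.Chars.strip (PySem.Chars.slice line (some 1) none))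
  else
    .para (PySem.Chars.replace (PySem.Chars.replace line ['*'] "<em>".toList) "<em>".toList "</em>".toList)

def pvIsBullet : PvRec → Bool
  | .bullet _ => true
  | _ => false

def pvItem : PvRec → List Char
  | .bullet c => "<li>|".toList ++ c ++ "</li>".toList
  | .para c => "<p>".toList ++ c ++ "</p>".toList
  | .emptyLine => "<p></p>".toList

-- emit whole maximal runs of bullets at once (the groupby of Source B)
def pvRender : List PvRec → List (List Char)
  | [] => []
  | .bullet c :: rest =>
      "<ul>".toList :: pvItem (.bullet c) :: ((rest.takeWhile pvIsBullet).map pvItem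
        ++ "</ul>".toList :: pvRender (rest.dropWhile pvIsBullet))
  | .para c :: rest => pvItem (.para c) :: pvRender rest
  | .emptyLine :: rest => pvItem .emptyLine :: pvRender rest
termination_by l => l.length
decreasing_by
  · exact Nat.lt_succ_of_le (List.length_dropWhile_le _ _)
  · simp
  · simp

def convert_instructor_notes_to_rich_text_py_alt (text : String) : String :=
  if text = "" then "" else
  String.ofList (PySem.Chars.join ['\n']
    (pvRender ((PySem.Chars.splitOn text.toList ['\n']).map pvClassify)))

-- ===== PRECONDITION & SPEC =====
def Spec_convert_instructor_notes_to_rich_text_py (text : String) (out : String) : Prop := out = convert_instructor_notes_to_rich_text_py_alt text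
instance (text : String) (out : String) : Decidable (Spec_convert_instructor_notes_to_rich_text_py text out) := by unfold Spec_convert_instructor_notes_to_rich_text_py; infer_instance

-- ===== CLAIM (what is proved, stated in full; the proofs are below) =====
def Claim_equal_convert_instructor_notes_to_rich_text_py : Prop := ∀ (text : String), Dom_convert_instructor_notes_to_rich_text_py text → Spec_convert_instructor_notes_to_rich_text_py text (convert_instructor_notes_to_rich_text_py text)

-- ===== LEMMAS AND PROOFS =====

-- replacing the first occurrence of a pattern by itself is the identity
theorem pvReplaceOnce_self (s old : List Char) : pvReplaceOnce s old old = s := by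
  unfold pvReplaceOnce
  by_cases h : PySem.Chars.find s old < 0
  · simp [h]
  · simp only [h, if_false]
    obtain ⟨t, ht⟩ := (PySem.Chars.find_spec (s := s) (sub := old) (by omega)).1
    have h2 : s.drop ((PySem.Chars.find s old).toNat + old.length) = t := by
      rw [← List.drop_drop, ← ht]
      simp
    rw [h2, List.append_assoc, ht, List.take_append_drop]

-- A's per-line step is the step on the classified record
def pvRecStep (st : List (List Char) × Bool) (r : PvRec) : List (List Char) × Bool :=
  match r with
  | .emptyLine => ((if st.2 then st.1 ++ ["</ul>".toList] else st.1) ++ [pvItem .emptyLine], false)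
  | .bullet c => ((if st.2 then st.1 else st.1 ++ ["<ul>".toList]) ++ [pvItem (.bullet c)], true)
  | .para c => ((if st.2 then st.1 ++ ["</ul>".toList] else st.1) ++ [pvItem (.para c)], false)

theorem pvAStep_eq (st : List (List Char) × Bool) (raw : List Char) :
    pvAStep st raw = pvRecStep st (pvClassify raw) := by
  by_cases hA : PySem.Chars.strip raw = []
  · simp [pvAStep, pvClassify, hA, pvRecStep, pvItem]
  · by_cases hB : PySem.Chars.startswith (PySem.Chars.strip raw) ['-', ' ', '|'] = true
    · simp [pvAStep, pvClassify, hA, hB, pvRecStep, pvItem]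
    · by_cases hC : (PySem.Chars.startswith (PySem.Chars.strip raw) ['|'] = true ∧
          PySem.Chars.startswith (PySem.Chars.strip raw) ['|','I','N','S','T','R','U','C','T','O','R'] = false) ∧
          PySem.Chars.startswith (PySem.Chars.strip raw) ['|','S','T','U','D','E','N','T'] = false
      · simp [pvAStep, pvClassify, hA, hB, hC.1.1, hC.1.2, hC.2, pvRecStep, pvItem]
      · simp [pvAStep, pvClassify, hA, hB, hC, pvRecStep, pvItem, pvParaA, pvReplaceOnce_self]

def pvFinalize (st : List (List Char) × Bool) : List (List Char) :=
  if st.2 then st.1 ++ ["</ul>".toList] else st.1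

theorem pvFold_render (recs : List PvRec) : ∀ acc : List (List Char),
    (pvFinalize (recs.foldl pvRecStep (acc, false)) = acc ++ pvRender recs) ∧
    (pvFinalize (recs.foldl pvRecStep (acc, true)) =
      acc ++ (recs.takeWhile pvIsBullet).map pvItem ++ "</ul>".toList :: pvRender (recs.dropWhile pvIsBullet)) := by
  induction recs with
  | nil => intro acc; simp [pvFinalize, pvRender]
  | cons r rest ih =>
    intro acc
    cases r with
    | emptyLine =>
      constructor
      · rw [List.foldl_cons]
        show pvFinalize (rest.foldl pvRecStep (acc ++ [pvItem .emptyLine], false)) = _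
        rw [(ih _).1]; simp [pvRender]
      · rw [List.foldl_cons]
        show pvFinalize (rest.foldl pvRecStep (acc ++ ["</ul>".toList] ++ [pvItem .emptyLine], false)) = _
        rw [(ih _).1]; simp [pvRender, pvIsBullet]
    | para c =>
      constructor
      · rw [List.foldl_cons]
        show pvFinalize (rest.foldl pvRecStep (acc ++ [pvItem (.para c)], false)) = _
        rw [(ih _).1]; simp [pvRender]
      · rw [List.foldl_cons]
        show pvFinalize (rest.foldl pvRecStep (acc ++ ["</ul>".toList] ++ [pvItem (.para c)], false)) = _
        rw [(ih _).1]; simp [pvRender, pvIsBullet]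
    | bullet c =>
      constructor
      · rw [List.foldl_cons]
        show pvFinalize (rest.foldl pvRecStep (acc ++ ["<ul>".toList] ++ [pvItem (.bullet c)], true)) = _
        rw [(ih _).2]; simp [pvRender]
      · rw [List.foldl_cons]
        show pvFinalize (rest.foldl pvRecStep (acc ++ [pvItem (.bullet c)], true)) = _
        rw [(ih _).2]; simp [pvIsBullet]

-- ===== VERDICT (by name: the statement is the Claim_ definition above) =====
theorem convert_instructor_notes_to_rich_text_py_spec : Claim_equal_convert_instructor_notes_to_rich_text_py := by
  intro text _
  unfold Spec_convert_instructor_notes_to_rich_text_py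
  unfold convert_instructor_notes_to_rich_text_py convert_instructor_notes_to_rich_text_py_alt
  by_cases h : text = ""
  · simp [h]
  · simp only [h, if_false]
    congr 1
    have hfold : ∀ (ls : List (List Char)) (st : List (List Char) × Bool),
        List.foldl pvAStep st ls = List.foldl pvRecStep st (ls.map pvClassify) := by
      intro ls
      induction ls with
      | nil => intro st; rfl
      | cons x xs ih => intro st; rw [List.foldl_cons, List.map_cons, List.foldl_cons, pvAStep_eq]; exact ih _
    show PySem.Chars.join ['\n']
        (pvFinalize (List.foldl pvAStep ([], false) (PySem.Chars.splitOn text.toList ['\n']))) = _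
    rw [hfold, (pvFold_render _ []).1, List.nil_append]
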